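-- pv_equiv track=rewrite | github.com/LaplaceFox/project-euler | pe214.py | totsieve
-- ===== SOURCE A (Python) =====
-- import math
--
-- def totsieve(n):
--     toSieve = list(range(n+1))
--     toSieve[0] = None
--     toSieve[1] = None
--
--     totients = [1]*(n+1)
--     totients[0] = None
--     totients[1] = None
--
--     for p in range(n+1):
--         if toSieve[p] != None: # k is prime
--             if p <= math.floor(math.sqrt(n+1))+1:
--                 toSieve[2*p::p] = [None]*len(toSieve[2*p::p])
--
--             for i in range(p,n+1,p):
--                 totients[i] *= p-1
--
--             k = 2
--             while p**k <= n:
--                 for i in range(p**k,n+1,p**k):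
--                     totients[i] *= p
--                 k += 1
--
--     primelist = list(filter(lambda x: x != None, toSieve))
--
--     return (primelist,totients)
-- ===== SOURCE B (Python) =====
-- def totsieve(n):
--     # Subtractive Euler sieve: totients[i] starts at i; each prime p found
--     # (totients[p] still == p) runs one pass subtracting totients[j]//p.
--     totients = list(range(n + 1))
--     primelist = []
--     for i in range(2, n + 1):
--         if totients[i] == i:  # i is prime
--             primelist.append(i)
--             for j in range(i, n + 1, i):
--                 totients[j] -= totients[j] // i
--     totients[0] = None
--     totients[1] = None
--     return (primelist, totients)
-- ===== Notes on version B (the rewrite author's own statement) =====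
-- stated objective: simpler
-- what changed: Replaces A's None-marking sieve array plus per-prime multiply-by-(p-1) pass and separate prime-power passes with a single subtractive Euler-sieve pass per prime (totients[j] -= totients[j]//i) over one array that doubles as the primality test.
import Mathlib
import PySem

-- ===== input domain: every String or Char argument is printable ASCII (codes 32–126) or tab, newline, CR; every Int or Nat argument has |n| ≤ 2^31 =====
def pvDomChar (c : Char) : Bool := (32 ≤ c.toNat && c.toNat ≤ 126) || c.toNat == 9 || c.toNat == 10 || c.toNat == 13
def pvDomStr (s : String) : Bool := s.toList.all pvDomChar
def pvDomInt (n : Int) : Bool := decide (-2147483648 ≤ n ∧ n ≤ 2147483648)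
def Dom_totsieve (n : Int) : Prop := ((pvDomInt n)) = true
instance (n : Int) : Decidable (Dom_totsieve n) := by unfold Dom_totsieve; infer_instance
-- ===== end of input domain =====

-- B replaces A's multiply-by-(p-1) pass plus separate prime-power passes (and the
-- extra sieve array) with a single subtractive Euler-sieve pass per prime: simpler.

-- ===== PORT A =====
-- math.floor(math.sqrt(m)) ported as the integer square root: exact for the
-- 0 ≤ m ≤ 2^31 + 2 reachable under Dom (a double sqrt only rounds across an
-- integer beyond 2^52).
def pyIsqrt (m : Int) : Int := (Nat.sqrt m.toNat : Int)

-- toSieve[2*p::p] = [None]*len(toSieve[2*p::p]) : set slice positions 2p, 3p, … ≤ n to None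
def markPass (s : List (Option Int)) (p n : Int) : List (Option Int) :=
  (PySem.List.pyRange (2*p) (n+1) p).foldl (fun acc i => PySem.List.pySetD acc i none) s

-- for i in range(a, n+1, a): totients[i] *= c   (reads are in range; default unused)
def mulPass (t : List (Option Int)) (a n c : Int) : List (Option Int) :=
  (PySem.List.pyRange a (n+1) a).foldl
    (fun acc i => PySem.List.pySetD acc i ((PySem.List.pyGetD acc i none).map (· * c))) t

-- k = 2; while p**k <= n: …; k += 1   (fuel n.toNat+2 is ample: the loop is only
-- reached for prime p ≥ 2, where at most log2 n iterations run)
def powLoop (p n : Int) : Nat → Nat → List (Option Int) → List (Option Int)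
  | 0, _, t => t
  | fuel+1, k, t =>
      if p ^ k ≤ n then powLoop p n fuel (k+1) (mulPass t ((p ^ k : Int)) n p) else t

def totsieve (n : Int) : List Int × List (Option Int) :=
  let toSieve := (PySem.List.pyRange 0 (n+1) 1).map some
  let toSieve := PySem.List.pySetD toSieve 0 none
  let toSieve := PySem.List.pySetD toSieve 1 none
  let totients := PySem.List.pyRepeat [some (1:Int)] (n+1)
  let totients := PySem.List.pySetD totients 0 none
  let totients := PySem.List.pySetD totients 1 none
  let st := (PySem.List.pyRange 0 (n+1) 1).foldl
    (fun (st : List (Option Int) × List (Option Int)) p =>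
      if (PySem.List.pyGetD st.1 p none).isSome then      -- toSieve[p] != None
        let s := if p ≤ pyIsqrt (n+1) + 1 then markPass st.1 p n else st.1
        let t := mulPass st.2 p n (p-1)
        let t := powLoop p n (n.toNat+2) 2 t
        (s, t)
      else st) (toSieve, totients)
  (st.1.filterMap id, st.2)   -- list(filter(lambda x: x != None, toSieve)): keep Some values

-- ===== PORT B =====
-- for j in range(i, n+1, i): totients[j] -= totients[j] // i
def subPass (t : List Int) (i n : Int) : List Int :=
  (PySem.List.pyRange i (n+1) i).foldl
    (fun acc j => PySem.List.pySetD acc j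
      (PySem.List.pyGetD acc j 0 - PySem.Int.floordiv (PySem.List.pyGetD acc j 0) i)) t

def totsieve_alt (n : Int) : List Int × List (Option Int) :=
  let st := (PySem.List.pyRange 2 (n+1) 1).foldl
    (fun (st : List Int × List Int) i =>
      if PySem.List.pyGetD st.2 i 0 = i then             -- totients[i] == i: i prime
        (st.1 ++ [i], subPass st.2 i n)
      else st) ([], PySem.List.pyRange 0 (n+1) 1)
  let tt := st.2.map some   -- the list becomes Optional once the Nones are stored
  let tt := PySem.List.pySetD tt 0 none
  let tt := PySem.List.pySetD tt 1 none
  (st.1, tt)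

-- ===== PRECONDITION & SPEC =====
-- A executes toSieve[1] = None: for n < 1 the list is too short and Python raises
-- IndexError (B raises there too), so exactly n ≥ 1 is admitted.
def Pre_totsieve (n : Int) : Prop := 1 ≤ n
instance (n : Int) : Decidable (Pre_totsieve n) := by unfold Pre_totsieve; infer_instance
def pvWitness_totsieve : Int := 10

def Spec_totsieve (n : Int) (out : List Int × List (Option Int)) : Prop := out = totsieve_alt n
instance (n : Int) (out : List Int × List (Option Int)) : Decidable (Spec_totsieve n out) := by unfold Spec_totsieve; infer_instance

-- ===== CLAIM (what is proved, stated in full; the proofs are below) =====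
def Claim_equal_totsieve : Prop := ∀ (n : Int), Dom_totsieve n → Pre_totsieve n → Spec_totsieve n (totsieve n)

-- ===== LEMMAS AND PROOFS =====

lemma set_map_range {α : Type} (f : ℕ → α) (m k : ℕ) (v : α) (_hk : k < m) :
    ((List.range m).map f).set k v = (List.range m).map (Function.update f k v) := by
  apply List.ext_getElem
  · simp
  · intro j h1 h2
    simp only [List.getElem_set, List.getElem_map, List.getElem_range]
    simp at h1
    rcases eq_or_ne j k with h | h
    · simp [h, Function.update]
    · simp [Function.update, Ne.symm h, h]

lemma foldl_setPass {α : Type} (d : α) (g : Int → α → α) (m : ℕ)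
    (F : List α → Int → List α)
    (hF : ∀ acc i, F acc i = PySem.List.pySetD acc i (g i (PySem.List.pyGetD acc i d))) :
    ∀ (L : List Int) (f : ℕ → α), L.Nodup → (∀ i ∈ L, 0 ≤ i ∧ i < (m:Int)) →
    L.foldl F ((List.range m).map f)
      = (List.range m).map (fun (j:ℕ) => if (j:Int) ∈ L then g (j:Int) (f j) else f j) := by
  intro L
  induction L with
  | nil => intro f _ _; simp
  | cons i L ih =>
    intro f hnd hb
    obtain ⟨hi0, him⟩ := hb i (by simp)
    have hitn : i.toNat < m := by omega
    have hcast : ((i.toNat : ℕ) : Int) = i := Int.toNat_of_nonneg hi0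
    have hget : PySem.List.pyGetD ((List.range m).map f) i d = f i.toNat := by
      rw [PySem.List.pyGetD_eq_getElem _ d hi0 (by simpa using him)]
      simp [List.getElem_map, List.getElem_range]
    have hset : F ((List.range m).map f) i
        = (List.range m).map (Function.update f i.toNat (g i (f i.toNat))) := by
      rw [hF, hget, PySem.List.pySetD_of_nonneg _ _ hi0, set_map_range _ _ _ _ hitn]
    rw [List.foldl_cons, hset,
        ih _ (List.nodup_cons.mp hnd).2 (fun x hx => hb x (List.mem_cons_of_mem _ hx))]
    apply List.map_congr_left
    intro j hj
    have hjm : j < m := List.mem_range.mp hj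
    rcases eq_or_ne ((j:Int)) i with he | he
    · have hjk : j = i.toNat := by omega
      subst hjk
      have hnotL : i ∉ L := (List.nodup_cons.mp hnd).1
      rw [hcast]
      simp [List.mem_cons, hnotL, Function.update_self]
    · have hne : j ≠ i.toNat := by omega
      simp [Function.update, hne, he]

lemma nodup_pyRange_pos (a b s : Int) (hs : 0 < s) : (PySem.List.pyRange a b s).Nodup := by
  rw [PySem.List.pyRange_of_pos a b hs]
  apply List.Nodup.map _ (List.nodup_range)
  intro x y h
  have h2 : s * (x:Int) = s * y := add_left_cancel h
  have := mul_left_cancel₀ (by omega : (s:Int) ≠ 0) h2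
  exact_mod_cast this

lemma mem_pyRange_start (q j N : ℕ) (hq : 1 ≤ q) (hj : j < N+1) :
    ((j:Int) ∈ PySem.List.pyRange (q:Int) ((N:Int)+1) (q:Int)) ↔ (q ∣ j ∧ j ≠ 0) := by
  rw [PySem.List.mem_pyRange_iff_of_pos (by exact_mod_cast hq)]
  constructor
  · rintro ⟨h1, h2, h3⟩
    have hd : (q:Int) ∣ (j:Int) := by
      have h := dvd_add h3 (dvd_refl (q:Int)); simpa using h
    exact ⟨by exact_mod_cast hd, by omega⟩
  · rintro ⟨h1, h2⟩
    have hle : q ≤ j := Nat.le_of_dvd (by omega) h1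
    refine ⟨by exact_mod_cast hle, by exact_mod_cast hj, ?_⟩
    have : (q:Int) ∣ (j:Int) := by exact_mod_cast h1
    exact dvd_sub this dvd_rfl

lemma mem_pyRange_start2 (q j N : ℕ) (hq : 1 ≤ q) (hj : j < N+1) :
    ((j:Int) ∈ PySem.List.pyRange (2*(q:Int)) ((N:Int)+1) (q:Int)) ↔ (q ∣ j ∧ q < j) := by
  rw [PySem.List.mem_pyRange_iff_of_pos (by exact_mod_cast hq)]
  constructor
  · rintro ⟨h1, h2, h3⟩
    have hd : (q:Int) ∣ (j:Int) := by
      have h := dvd_add h3 (dvd_mul_left (q:Int) 2); simpa using h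
    have hdn : q ∣ j := by exact_mod_cast hd
    refine ⟨hdn, ?_⟩
    have : (2*q : Int) ≤ j := h1
    omega
  · rintro ⟨h1, h2⟩
    obtain ⟨c, rfl⟩ := h1
    have hc2 : 2 ≤ c := by nlinarith
    refine ⟨?_, by exact_mod_cast hj, ?_⟩
    · push_cast; nlinarith
    · push_cast; exact ⟨(c:Int) - 2, by ring⟩

lemma pyRange_bounds (a b s : Int) (hs : 0 < s) (ha : 0 ≤ a) :
    ∀ i ∈ PySem.List.pyRange a b s, 0 ≤ i ∧ i < b := by
  intro i hi
  rw [PySem.List.mem_pyRange_iff_of_pos hs] at hi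
  exact ⟨by omega, hi.2.1⟩

lemma mulPass_char (N q : ℕ) (hq : 1 ≤ q) (c : Int) (f : ℕ → Option Int) :
    mulPass ((List.range (N+1)).map f) (q:Int) (N:Int) c
      = (List.range (N+1)).map (fun j => if q ∣ j ∧ j ≠ 0 then (f j).map (· * c) else f j) := by
  unfold mulPass
  rw [foldl_setPass none (fun _ v => v.map (· * c)) (N+1) _ (fun _ _ => rfl) _ f
      (nodup_pyRange_pos _ _ _ (by exact_mod_cast hq))
      (by intro i hi
          have := pyRange_bounds (q:Int) ((N:Int)+1) (q:Int) (by exact_mod_cast hq) (by positivity) i hi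
          constructor <;> [exact this.1; exact_mod_cast this.2])]
  apply List.map_congr_left
  intro j hj
  simp only [mem_pyRange_start q j N hq (List.mem_range.mp hj)]

lemma markPass_char (N q : ℕ) (hq : 1 ≤ q) (f : ℕ → Option Int) :
    markPass ((List.range (N+1)).map f) (q:Int) (N:Int)
      = (List.range (N+1)).map (fun j => if q ∣ j ∧ q < j then none else f j) := by
  unfold markPass
  rw [foldl_setPass none (fun _ _ => none) (N+1) _ (fun _ _ => rfl) _ f
      (nodup_pyRange_pos _ _ _ (by exact_mod_cast hq))
      (by intro i hi
          have := pyRange_bounds (2*(q:Int)) ((N:Int)+1) (q:Int) (by exact_mod_cast hq) (by positivity) i hi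
          constructor <;> [exact this.1; exact_mod_cast this.2])]
  apply List.map_congr_left
  intro j hj
  simp only [mem_pyRange_start2 q j N hq (List.mem_range.mp hj)]

lemma subPass_char (N q : ℕ) (hq : 1 ≤ q) (f : ℕ → Int) :
    subPass ((List.range (N+1)).map f) (q:Int) (N:Int)
      = (List.range (N+1)).map (fun j =>
          if q ∣ j ∧ j ≠ 0 then f j - PySem.Int.floordiv (f j) (q:Int) else f j) := by
  unfold subPass
  rw [foldl_setPass 0 (fun _ v => v - PySem.Int.floordiv v (q:Int)) (N+1) _ (fun _ _ => rfl) _ f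
      (nodup_pyRange_pos _ _ _ (by exact_mod_cast hq))
      (by intro i hi
          have := pyRange_bounds (q:Int) ((N:Int)+1) (q:Int) (by exact_mod_cast hq) (by positivity) i hi
          constructor <;> [exact this.1; exact_mod_cast this.2])]
  apply List.map_congr_left
  intro j hj
  simp only [mem_pyRange_start q j N hq (List.mem_range.mp hj)]

def cnt (N q k j : ℕ) : ℕ :=
  ((Finset.Ico k (N+2)).filter (fun k' => q^k' ≤ N ∧ q^k' ∣ j)).card

lemma opt_map_mul_one (o : Option Int) : o.map (· * (1:Int)) = o := by
  cases o <;> simp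

lemma cnt_zero_of_no (N q k j : ℕ) (hq : 2 ≤ q) (h : ¬ q^k ≤ N) : cnt N q k j = 0 := by
  unfold cnt
  rw [Finset.card_eq_zero, Finset.filter_eq_empty_iff]
  intro k' hk'
  rw [Finset.mem_Ico] at hk'
  have : q^k ≤ q^k' := Nat.pow_le_pow_right (by omega) hk'.1
  simp only [not_and]
  intro hle
  omega

lemma cnt_lt (N q k : ℕ) (hq : 2 ≤ q) (hle : q^k ≤ N) : k < N+2 := by
  have h1 : k < 2^k := Nat.lt_two_pow_self
  have h2 : 2^k ≤ q^k := Nat.pow_le_pow_left hq k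
  omega

lemma cnt_succ_hit (N q k j : ℕ) (hq : 2 ≤ q) (hle : q^k ≤ N) (hd : q^k ∣ j) :
    cnt N q k j = cnt N q (k+1) j + 1 := by
  unfold cnt
  rw [show Finset.Ico k (N+2) = insert k (Finset.Ico (k+1) (N+2)) by
        exact (Finset.insert_Ico_add_one_left_eq_Ico (cnt_lt N q k hq hle)).symm,
      Finset.filter_insert, if_pos ⟨hle, hd⟩,
      Finset.card_insert_of_notMem (by simp [Finset.mem_filter])]

lemma cnt_succ_miss (N q k j : ℕ) (hq : 2 ≤ q) (hd : ¬ q^k ∣ j) :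
    cnt N q k j = cnt N q (k+1) j := by
  by_cases hle : q^k ≤ N
  · unfold cnt
    rw [show Finset.Ico k (N+2) = insert k (Finset.Ico (k+1) (N+2)) by
          exact (Finset.insert_Ico_add_one_left_eq_Ico (cnt_lt N q k hq hle)).symm,
        Finset.filter_insert, if_neg (by simp [hd])]
  · rw [cnt_zero_of_no N q k j hq hle, cnt_zero_of_no N q (k+1) j hq
        (by intro h; exact hle (le_trans (Nat.pow_le_pow_right (by omega) (by omega)) h))]

lemma powLoop_char (N q : ℕ) (hq : 2 ≤ q) :
    ∀ (fuel k : ℕ), N + 2 ≤ k + fuel → ∀ f : ℕ → Option Int, f 0 = none →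
    powLoop (q:Int) (N:Int) fuel k ((List.range (N+1)).map f)
      = (List.range (N+1)).map (fun j => (f j).map (· * (q:Int) ^ (cnt N q k j))) := by
  intro fuel
  induction fuel with
  | zero =>
    intro k hk f hf0
    have hno : ¬ q^k ≤ N := by
      have h1 : k < 2^k := Nat.lt_two_pow_self
      have h2 : 2^k ≤ q^k := Nat.pow_le_pow_left hq k
      omega
    unfold powLoop
    symm; apply List.map_congr_left
    intro j _
    rw [cnt_zero_of_no N q k j hq hno, pow_zero, opt_map_mul_one]
  | succ fuel ih =>
    intro k hk f hf0
    unfold powLoop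
    by_cases hle : (q:Int)^k ≤ (N:Int)
    · have hleN : q^k ≤ N := by exact_mod_cast hle
      rw [if_pos hle]
      have hcast : ((q:Int))^k = ((q^k : ℕ):Int) := by push_cast; ring
      rw [hcast, mulPass_char N (q^k) (Nat.one_le_two_pow.trans (Nat.pow_le_pow_left hq k)) (q:Int) f]
      set f1 : ℕ → Option Int :=
        (fun j => if q^k ∣ j ∧ j ≠ 0 then (f j).map (· * (q:Int)) else f j) with hf1
      have hf10 : f1 0 = none := by simp [hf1, hf0]
      rw [ih (k+1) (by omega) f1 hf10]
      apply List.map_congr_left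
      intro j _
      by_cases hcase : q^k ∣ j ∧ j ≠ 0
      · rw [hf1]
        simp only [if_pos hcase]
        rw [cnt_succ_hit N q k j hq hleN hcase.1]
        cases f j <;> simp [pow_succ] <;> ring
      · rw [hf1]
        simp only [if_neg hcase]
        rcases (not_and_or.mp hcase) with h | h
        · rw [cnt_succ_miss N q k j hq h]
        · have : j = 0 := by omega
          rw [this, hf0]; simp
    · rw [if_neg hle]
      have hno : ¬ q^k ≤ N := by exact_mod_cast hle
      symm; apply List.map_congr_left
      intro j _
      rw [cnt_zero_of_no N q k j hq hno, pow_zero, opt_map_mul_one]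

def FD (p j : ℕ) : Finset ℕ := (Finset.range p).filter (fun q => Nat.Prime q ∧ q ∣ j)

def tbB (p j : ℕ) : ℕ := (∏ q ∈ FD p j, (q-1)) * (j / ∏ q ∈ FD p j, q)

lemma FD_not_self (i j : ℕ) : i ∉ FD i j := by simp [FD]

lemma FD_succ_hit (i j : ℕ) (hp : Nat.Prime i) (hd : i ∣ j) :
    FD (i+1) j = insert i (FD i j) := by
  unfold FD
  rw [Finset.range_add_one, Finset.filter_insert, if_pos ⟨hp, hd⟩]

lemma FD_succ_miss (i j : ℕ) (h : ¬ (Nat.Prime i ∧ i ∣ j)) : FD (i+1) j = FD i j := by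
  unfold FD
  rw [Finset.range_add_one, Finset.filter_insert, if_neg h]

lemma FD_subset_primeFactors (p j : ℕ) (hj : j ≠ 0) : FD p j ⊆ j.primeFactors := by
  intro q hq
  simp only [FD, Finset.mem_filter] at hq
  exact Nat.mem_primeFactors.mpr ⟨hq.2.1, hq.2.2, hj⟩

lemma prodFD_dvd (p j : ℕ) (hj : j ≠ 0) : (∏ q ∈ FD p j, q) ∣ j :=
  dvd_trans (Finset.prod_dvd_prod_of_subset _ _ _ (FD_subset_primeFactors p j hj))
    (Nat.prod_primeFactors_dvd j)

lemma prodFD_pos (p j : ℕ) : 0 < ∏ q ∈ FD p j, q := by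
  apply Finset.prod_pos
  intro q hq
  simp only [FD, Finset.mem_filter] at hq
  exact hq.2.1.pos

lemma tbB_zero (p : ℕ) : tbB p 0 = 0 := by simp [tbB]

lemma tbB_two (j : ℕ) : tbB 2 j = j := by
  have h : FD 2 j = ∅ := by
    apply Finset.eq_empty_of_forall_notMem
    intro q hq
    simp only [FD, Finset.mem_filter, Finset.mem_range] at hq
    have := hq.2.1.two_le
    omega
  simp [tbB, h]

lemma FD_self_prime (i : ℕ) (hp : Nat.Prime i) : FD i i = ∅ := by
  apply Finset.eq_empty_of_forall_notMem
  intro q hq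
  simp only [FD, Finset.mem_filter, Finset.mem_range] at hq
  rcases (Nat.Prime.eq_one_or_self_of_dvd hp q hq.2.2) with h | h
  · exact hq.2.1.one_lt.ne' h
  · omega

lemma tbB_self_prime (i : ℕ) (hp : Nat.Prime i) : tbB i i = i := by
  simp [tbB, FD_self_prime i hp]

lemma tbB_self_composite (i : ℕ) (h2 : 2 ≤ i) (hp : ¬ Nat.Prime i) : tbB i i < i := by
  have hne : (FD i i).Nonempty := by
    refine ⟨i.minFac, ?_⟩
    have hpf : Nat.Prime i.minFac := Nat.minFac_prime (by omega)
    have hlt : i.minFac < i := by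
      have hsq := Nat.minFac_sq_le_self (by omega) hp
      nlinarith [hpf.two_le]
    simp only [FD, Finset.mem_filter, Finset.mem_range]
    exact ⟨hlt, hpf, Nat.minFac_dvd i⟩
  have hlt : (∏ q ∈ FD i i, (q-1)) < ∏ q ∈ FD i i, q := by
    refine Finset.prod_lt_prod_of_nonempty ?_ ?_ hne
    · intro q hq
      simp only [FD, Finset.mem_filter] at hq
      have := hq.2.1.two_le; omega
    · intro q hq
      simp only [FD, Finset.mem_filter] at hq
      have := hq.2.1.two_le; omega
  have hB := prodFD_pos i i
  have hdvd := prodFD_dvd i i (by omega)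
  have hu : 0 < i / ∏ q ∈ FD i i, q := Nat.div_pos (Nat.le_of_dvd (by omega) hdvd) hB
  calc tbB i i < (∏ q ∈ FD i i, q) * (i / ∏ q ∈ FD i i, q) := by
        exact (Nat.mul_lt_mul_right hu).mpr hlt
    _ = i := Nat.mul_div_cancel' hdvd

lemma coprime_prodFD (i j : ℕ) (hp : Nat.Prime i) : i.Coprime (∏ q ∈ FD i j, q) := by
  apply Nat.Coprime.prod_right
  intro q hq
  simp only [FD, Finset.mem_filter, Finset.mem_range] at hq
  exact (Nat.coprime_primes hp hq.2.1).mpr (by omega)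

lemma tbB_step (i j : ℕ) (hp : Nat.Prime i) (hd : i ∣ j) (hj : j ≠ 0) :
    tbB i j - tbB i j / i = tbB (i+1) j := by
  set A := ∏ q ∈ FD i j, (q-1) with hA
  set B := ∏ q ∈ FD i j, q with hB
  have hBpos := prodFD_pos i j
  have hBdvd : B ∣ j := prodFD_dvd i j hj
  have hiB : i * B ∣ j := (coprime_prodFD i j hp).mul_dvd_of_dvd_of_dvd hd hBdvd
  set w := j / B with hw
  have hiw : i ∣ w := by
    obtain ⟨c, hc⟩ := hiB
    have : w = i * c := by
      rw [hw, hc, show i * B * c = B * (i * c) by ring, Nat.mul_div_cancel_left _ hBpos]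
    exact ⟨c, this⟩
  have hval : tbB i j = A * w := by rw [tbB, ← hA, ← hB, ← hw]
  set u := w / i with hu
  have hwu : w = i * u := (Nat.mul_div_cancel' hiw).symm
  have hstep1 : tbB i j / i = A * u := by
    rw [hval, Nat.mul_div_assoc A hiw, ← hu]
  have hw2 : w - u = (i - 1) * u := by
    rw [Nat.sub_one_mul, ← hwu]
  have hstep2 : tbB i j - tbB i j / i = A * ((i - 1) * u) := by
    rw [hval] at hstep1
    rw [hval, hstep1, ← Nat.mul_sub, hw2]
  rw [hstep2, tbB, FD_succ_hit i j hp hd,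
      Finset.prod_insert (FD_not_self i j), Finset.prod_insert (FD_not_self i j),
      ← hA, ← hB]
  have hji : j / (i * B) = u := by
    rw [hu, hw, Nat.div_div_eq_div_mul, Nat.mul_comm B i]
  rw [hji]
  ring

lemma tbB_step_int (i j : ℕ) (hp : Nat.Prime i) (hd : i ∣ j) (hj : j ≠ 0) :
    ((tbB i j : ℕ) : Int) - PySem.Int.floordiv ((tbB i j : ℕ) : Int) (i:Int)
      = ((tbB (i+1) j : ℕ) : Int) := by
  rw [PySem.Int.floordiv_natCast, ← tbB_step i j hp hd hj]
  have := Nat.div_le_self (tbB i j) i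
  push_cast [Nat.cast_sub this]
  ring

def bdN (N : ℕ) : ℕ := Nat.sqrt (N+1) + 1

def sfA (N p j : ℕ) : Option Int :=
  if j ≤ 1 ∨ ∃ q ∈ Finset.range p, Nat.Prime q ∧ q ≤ bdN N ∧ q ∣ j ∧ q < j
  then none else some (j:Int)

def taA (N p j : ℕ) : Option Int :=
  if j ≤ 1 then none
  else some ((∏ q ∈ FD p j, (q-1) * q ^ (cnt N q 2 j) : ℕ) : Int)

lemma exists_small_prime_factor (N j : ℕ) (h2 : 2 ≤ j) (hp : ¬ Nat.Prime j) (hle : j ≤ N+1) :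
    ∃ q, Nat.Prime q ∧ q ≤ bdN N ∧ q ∣ j ∧ q < j := by
  refine ⟨j.minFac, Nat.minFac_prime (by omega), ?_, Nat.minFac_dvd j, ?_⟩
  · have hsq := Nat.minFac_sq_le_self (by omega) hp
    have : j.minFac ≤ Nat.sqrt (N+1) := Nat.le_sqrt.mpr (by nlinarith [sq_nonneg j.minFac])
    unfold bdN; omega
  · have hsq := Nat.minFac_sq_le_self (by omega) hp
    have h2f := (Nat.minFac_prime (show j ≠ 1 by omega)).two_le
    nlinarith

lemma no_proper_prime_factor (j : ℕ) (hp : Nat.Prime j) :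
    ¬ ∃ q, Nat.Prime q ∧ q ∣ j ∧ q < j := by
  rintro ⟨q, hq, hd, hlt⟩
  rcases hp.eq_one_or_self_of_dvd q hd with h | h
  · exact hq.one_lt.ne' h
  · omega

lemma sfA_isSome_iff (N p : ℕ) (hpN : p ≤ N+1) :
    (sfA N p p).isSome = true ↔ (2 ≤ p ∧ Nat.Prime p) := by
  unfold sfA
  by_cases hc : p ≤ 1 ∨ ∃ q ∈ Finset.range p, Nat.Prime q ∧ q ≤ bdN N ∧ q ∣ p ∧ q < p
  · rw [if_pos hc]
    simp only [Option.isSome_none, Bool.false_eq_true, false_iff]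
    rintro ⟨h2, hp⟩
    rcases hc with h | ⟨q, hqr, hq1, hq2, hq3, hq4⟩
    · omega
    · exact no_proper_prime_factor p hp ⟨q, hq1, hq3, hq4⟩
  · rw [if_neg hc]
    simp only [Option.isSome_some, true_iff]
    have h2 : 2 ≤ p := by
      by_contra h
      exact hc (Or.inl (by omega))
    refine ⟨h2, ?_⟩
    by_contra hp
    obtain ⟨q, hq1, hq2, hq3, hq4⟩ := exists_small_prime_factor N p h2 hp hpN
    exact hc (Or.inr ⟨q, Finset.mem_range.mpr hq4, hq1, hq2, hq3, hq4⟩)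

lemma sfA_succ_prime_small (N p : ℕ) (hp : Nat.Prime p) (hb : p ≤ bdN N) (j : ℕ) :
    (if p ∣ j ∧ p < j then none else sfA N p j) = sfA N (p+1) j := by
  unfold sfA
  rw [Finset.range_add_one]
  by_cases hd : p ∣ j ∧ p < j
  · rw [if_pos hd, if_pos (Or.inr ⟨p, Finset.mem_insert_self _ _, hp, hb, hd.1, hd.2⟩)]
  · rw [if_neg hd]
    congr 1
    apply propext
    constructor
    · rintro (h | ⟨q, hq, hrest⟩)
      · exact Or.inl h
      · exact Or.inr ⟨q, Finset.mem_insert_of_mem hq, hrest⟩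
    · rintro (h | ⟨q, hq, hrest⟩)
      · exact Or.inl h
      · rcases Finset.mem_insert.mp hq with rfl | hq'
        · exact absurd ⟨hrest.2.2.1, hrest.2.2.2⟩ hd
        · exact Or.inr ⟨q, hq', hrest⟩

lemma sfA_succ_of_cond (N p j : ℕ)
    (h : Nat.Prime p → ¬ p ≤ bdN N) :
    sfA N (p+1) j = sfA N p j := by
  unfold sfA
  rw [Finset.range_add_one]
  congr 1
  apply propext
  constructor
  · rintro (h' | ⟨q, hq, hrest⟩)
    · exact Or.inl h'
    · rcases Finset.mem_insert.mp hq with rfl | hq'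
      · exact absurd hrest.2.1 (h hrest.1)
      · exact Or.inr ⟨q, hq', hrest⟩
  · rintro (h' | ⟨q, hq, hrest⟩)
    · exact Or.inl h'
    · exact Or.inr ⟨q, Finset.mem_insert_of_mem hq, hrest⟩

lemma taA_succ_miss (N p j : ℕ) (h : ¬ (Nat.Prime p ∧ p ∣ j)) : taA N (p+1) j = taA N p j := by
  unfold taA
  rw [FD_succ_miss p j h]

lemma sfA_final (N j : ℕ) (hj : j ≤ N) :
    sfA N (N+1) j = if Nat.Prime j then some (j:Int) else none := by
  unfold sfA
  by_cases hp : Nat.Prime j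
  · rw [if_pos hp, if_neg]
    rintro (h | ⟨q, hqr, hq1, hq2, hq3, hq4⟩)
    · have := hp.two_le; omega
    · exact no_proper_prime_factor j hp ⟨q, hq1, hq3, hq4⟩
  · rw [if_neg hp]
    by_cases h2 : j ≤ 1
    · rw [if_pos (Or.inl h2)]
    · obtain ⟨q, hq1, hq2, hq3, hq4⟩ := exists_small_prime_factor N j (by omega) hp (by omega)
      rw [if_pos (Or.inr ⟨q, Finset.mem_range.mpr (by omega), hq1, hq2, hq3, hq4⟩)]

lemma cnt_eq_factorization (N q j : ℕ) (hq : Nat.Prime q) (hd : q ∣ j) (hj1 : 1 ≤ j) (hjN : j ≤ N) :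
    cnt N q 2 j = j.factorization q - 1 := by
  set v := j.factorization q with hv
  have hv1 : 0 < v := hq.factorization_pos_of_dvd (by omega) hd
  have hset : (Finset.Ico 2 (N+2)).filter (fun k' => q^k' ≤ N ∧ q^k' ∣ j) = Finset.Ico 2 (v+1) := by
    ext k
    simp only [Finset.mem_filter, Finset.mem_Ico]
    constructor
    · rintro ⟨⟨h2, _⟩, _, hdk⟩
      have := (hq.pow_dvd_iff_le_factorization (by omega)).mp hdk
      exact ⟨h2, by omega⟩
    · rintro ⟨h2, hkv⟩
      have hdk : q^k ∣ j := (hq.pow_dvd_iff_le_factorization (by omega)).mpr (by omega)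
      have hle : q^k ≤ j := Nat.le_of_dvd (by omega) hdk
      have hvN : v < N := by
        have hdv : q^v ∣ j := (hq.pow_dvd_iff_le_factorization (by omega)).mpr le_rfl
        have h1 : q^v ≤ j := Nat.le_of_dvd (by omega) hdv
        have h2' : v < 2^v := Nat.lt_two_pow_self
        have h3 : 2^v ≤ q^v := Nat.pow_le_pow_left hq.two_le v
        omega
      exact ⟨⟨h2, by omega⟩, by omega, hdk⟩
  rw [cnt, hset, Nat.card_Ico]; omega

lemma key_eq (N j : ℕ) (h2 : 2 ≤ j) (hjN : j ≤ N) :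
    (∏ q ∈ FD (N+1) j, (q-1) * q ^ cnt N q 2 j) = tbB (N+1) j := by
  have hj0 : j ≠ 0 := by omega
  have hFD : FD (N+1) j = j.primeFactors := by
    ext q
    simp only [FD, Finset.mem_filter, Finset.mem_range, Nat.mem_primeFactors]
    constructor
    · rintro ⟨_, hq, hd⟩; exact ⟨hq, hd, hj0⟩
    · rintro ⟨hq, hd, _⟩
      exact ⟨by have := Nat.le_of_dvd (by omega) hd; omega, hq, hd⟩
  have hprod : ∏ q ∈ j.primeFactors, q ^ j.factorization q = j := by
    rw [← Nat.support_factorization]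
    exact Nat.prod_factorization_pow_eq_self hj0
  have hsplit : ∏ q ∈ j.primeFactors, q ^ j.factorization q
      = (∏ q ∈ j.primeFactors, q) * ∏ q ∈ j.primeFactors, q ^ (j.factorization q - 1) := by
    rw [← Finset.prod_mul_distrib]
    apply Finset.prod_congr rfl
    intro q hq
    rw [Nat.mem_primeFactors] at hq
    have hv1 : 0 < j.factorization q := hq.1.factorization_pos_of_dvd hj0 hq.2.1
    rw [← pow_succ']
    congr 1
    omega
  have hdivp : j / (∏ q ∈ j.primeFactors, q) = ∏ q ∈ j.primeFactors, q ^ (j.factorization q - 1) := by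
    have hpos : 0 < ∏ q ∈ j.primeFactors, q :=
      Finset.prod_pos (fun q hq => (Nat.prime_of_mem_primeFactors hq).pos)
    apply Nat.div_eq_of_eq_mul_left hpos
    rw [Nat.mul_comm, ← hsplit]
    exact hprod.symm
  rw [tbB, hFD, hdivp, ← Finset.prod_mul_distrib]
  apply Finset.prod_congr rfl
  intro q hq
  rw [Nat.mem_primeFactors] at hq
  rw [cnt_eq_factorization N q j hq.1 hq.2.1 (by omega) hjN]

lemma filterMap_ite (l : List ℕ) (f : ℕ → Option Int) (p : ℕ → Bool) (g : ℕ → Int)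
    (h : ∀ j ∈ l, f j = if p j then some (g j) else none) :
    l.filterMap f = (l.filter p).map g := by
  induction l with
  | nil => rfl
  | cons x xs ih =>
    rw [List.filterMap_cons, List.filter_cons, h x List.mem_cons_self,
        ih (fun j hj => h j (List.mem_cons_of_mem _ hj))]
    by_cases hp : p x = true <;> simp [hp]

lemma cnt_zero_not_dvd (N q k j : ℕ) (hk : 1 ≤ k) (h : ¬ q ∣ j) : cnt N q k j = 0 := by
  unfold cnt
  rw [Finset.card_eq_zero, Finset.filter_eq_empty_iff]
  intro k' hk'
  rw [Finset.mem_Ico] at hk'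
  simp only [not_and]
  intro _ hd
  exact h (dvd_trans (dvd_pow_self q (by omega)) hd)

def bodyA (n : Int) (st : List (Option Int) × List (Option Int)) (p : Int) :
    List (Option Int) × List (Option Int) :=
  if (PySem.List.pyGetD st.1 p none).isSome then
    (if p ≤ pyIsqrt (n+1) + 1 then markPass st.1 p n else st.1,
     powLoop p n (n.toNat+2) 2 (mulPass st.2 p n (p-1)))
  else st

lemma totsieve_eq (n : Int) :
    totsieve n =
      (((PySem.List.pyRange 0 (n+1) 1).foldl (bodyA n)
        (PySem.List.pySetD (PySem.List.pySetD ((PySem.List.pyRange 0 (n+1) 1).map some) 0 none) 1 none,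
         PySem.List.pySetD (PySem.List.pySetD (PySem.List.pyRepeat [some (1:Int)] (n+1)) 0 none) 1 none)).1.filterMap id,
       ((PySem.List.pyRange 0 (n+1) 1).foldl (bodyA n)
        (PySem.List.pySetD (PySem.List.pySetD ((PySem.List.pyRange 0 (n+1) 1).map some) 0 none) 1 none,
         PySem.List.pySetD (PySem.List.pySetD (PySem.List.pyRepeat [some (1:Int)] (n+1)) 0 none) 1 none)).2) := rfl

def bodyB (n : Int) (st : List Int × List Int) (i : Int) : List Int × List Int :=
  if PySem.List.pyGetD st.2 i 0 = i then (st.1 ++ [i], subPass st.2 i n) else st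

lemma totsieve_alt_eq (n : Int) :
    totsieve_alt n =
      (((PySem.List.pyRange 2 (n+1) 1).foldl (bodyB n) ([], PySem.List.pyRange 0 (n+1) 1)).1,
       PySem.List.pySetD (PySem.List.pySetD
         ((((PySem.List.pyRange 2 (n+1) 1).foldl (bodyB n) ([], PySem.List.pyRange 0 (n+1) 1)).2).map some)
         0 none) 1 none) := rfl

lemma setD01_map {α : Type} (f : ℕ → α) (N : ℕ) (hN : 1 ≤ N) (v w : α) :
    PySem.List.pySetD (PySem.List.pySetD ((List.range (N+1)).map f) 0 v) 1 w
      = (List.range (N+1)).map (Function.update (Function.update f 0 v) 1 w) := by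
  rw [PySem.List.pySetD_of_nonneg _ _ (le_refl (0:Int)),
      Int.toNat_zero, set_map_range _ _ _ _ (by omega),
      PySem.List.pySetD_of_nonneg _ _ (by norm_num : (0:Int) ≤ 1),
      Int.toNat_one, set_map_range _ _ _ _ (by omega)]

lemma taA_step_pointwise (N p j : ℕ) (hpr : Nat.Prime p) :
    ((if p ∣ j ∧ j ≠ 0 then (taA N p j).map (· * ((p:Int)-1)) else taA N p j).map
        (· * (p:Int) ^ cnt N p 2 j)) = taA N (p+1) j := by
  by_cases hj1 : j ≤ 1
  · have h1 : taA N p j = none := by unfold taA; rw [if_pos hj1]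
    have h2 : taA N (p+1) j = none := by unfold taA; rw [if_pos hj1]
    split_ifs with h <;> simp [h1, h2]
  · by_cases hd : p ∣ j
    · rw [if_pos ⟨hd, by omega⟩]
      unfold taA
      rw [if_neg hj1, if_neg hj1]
      simp only [Option.map_some]
      congr 1
      rw [FD_succ_hit p j hpr hd, Finset.prod_insert (FD_not_self p j)]
      push_cast [Nat.cast_sub hpr.one_lt.le]
      ring
    · rw [if_neg (by tauto)]
      rw [cnt_zero_not_dvd N p 2 j (by omega) hd, pow_zero, opt_map_mul_one,
          taA_succ_miss N p j (by tauto)]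

lemma A_loop (N : ℕ) (hN : 1 ≤ N) : ∀ p : ℕ, p ≤ N+1 →
    ((List.range p).map (fun k => ((k:ℕ):Int))).foldl (bodyA (N:Int))
        ((List.range (N+1)).map (sfA N 0), (List.range (N+1)).map (taA N 0))
      = ((List.range (N+1)).map (sfA N p), (List.range (N+1)).map (taA N p)) := by
  intro p
  induction p with
  | zero => intro _; rfl
  | succ p ih =>
    intro hp
    have hsplit : (List.range (p+1)).map (fun k => ((k:ℕ):Int))
        = (List.range p).map (fun k => ((k:ℕ):Int)) ++ [((p:ℕ):Int)] := by
      rw [List.range_succ]; simp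
    rw [hsplit, List.foldl_append, ih (by omega), List.foldl_cons, List.foldl_nil]
    have htest : (PySem.List.pyGetD ((List.range (N+1)).map (sfA N p)) ((p:ℕ):Int) none)
        = sfA N p p := by
      rw [PySem.List.pyGetD_natCast, PySem.List.getD_map_range _ _ _ _ (by omega)]
    unfold bodyA
    rw [htest]
    by_cases hsome : (sfA N p p).isSome = true
    · obtain ⟨h2, hpr⟩ := (sfA_isSome_iff N p (by omega)).mp hsome
      rw [if_pos hsome]
      simp only [Prod.mk.injEq]
      constructor
      · have hiso : pyIsqrt ((N:Int)+1) = (Nat.sqrt (N+1) : Int) := by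
          unfold pyIsqrt
          have harg : ((N:Int)+1).toNat = N+1 := by omega
          rw [harg]
        rw [hiso]
        by_cases hb : p ≤ bdN N
        · rw [if_pos (by unfold bdN at hb; omega)]
          rw [markPass_char N p (by omega) (sfA N p)]
          apply List.map_congr_left
          intro j _
          exact sfA_succ_prime_small N p hpr hb j
        · rw [if_neg (by unfold bdN at hb; omega)]
          apply List.map_congr_left
          intro j _
          exact (sfA_succ_of_cond N p j (fun _ => hb)).symm
      · rw [mulPass_char N p (by omega) ((p:Int)-1) (taA N p)]
        have hfuel : ((N:Int)).toNat + 2 = N + 2 := by omega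
        rw [hfuel, powLoop_char N p h2 (N+2) 2 (by omega) _
            (by simp only [if_neg (by omega : ¬((p:ℕ) ∣ 0 ∧ (0:ℕ) ≠ 0))]
                unfold taA; rw [if_pos (by omega)])]
        apply List.map_congr_left
        intro j _
        exact taA_step_pointwise N p j hpr
    · rw [if_neg hsome]
      have hnpr : ¬ Nat.Prime p := fun h =>
        hsome ((sfA_isSome_iff N p (by omega)).mpr ⟨h.two_le, h⟩)
      simp only [Prod.mk.injEq]
      constructor
      · apply List.map_congr_left
        intro j _
        exact (sfA_succ_of_cond N p j (fun hp' => absurd hp' hnpr)).symm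
      · apply List.map_congr_left
        intro j _
        exact (taA_succ_miss N p j (fun h => hnpr h.1)).symm

def primesL (N : ℕ) : List Int :=
  ((List.range (N+1)).filter (fun q => decide (Nat.Prime q))).map (fun q => ((q:ℕ):Int))

def totL (N : ℕ) : List (Option Int) :=
  (List.range (N+1)).map (fun j => if j ≤ 1 then none else some ((tbB (N+1) j : ℕ) : Int))

lemma tbB_succ_notprime (i j : ℕ) (h : ¬ Nat.Prime i) : tbB (i+1) j = tbB i j := by
  unfold tbB
  rw [FD_succ_miss i j (fun hc => h hc.1)]

lemma tbB_succ_notdvd (i j : ℕ) (h : ¬ i ∣ j) : tbB (i+1) j = tbB i j := by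
  unfold tbB
  rw [FD_succ_miss i j (fun hc => h hc.2)]

lemma B_loop (N : ℕ) (_hN : 1 ≤ N) : ∀ t : ℕ, 2 + t ≤ N+1 →
    ((List.range t).map (fun k => ((2+k : ℕ):Int))).foldl (bodyB (N:Int))
        ([], (List.range (N+1)).map (fun j => ((j:ℕ):Int)))
      = (((List.range (2+t)).filter (fun q => decide (Nat.Prime q))).map (fun q => ((q:ℕ):Int)),
         (List.range (N+1)).map (fun j => ((tbB (2+t) j : ℕ):Int))) := by
  intro t
  induction t with
  | zero =>
    intro _
    simp only [List.range_zero, List.map_nil, List.foldl_nil, Prod.mk.injEq]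
    constructor
    · rw [show (List.range 2).filter (fun q => decide (Nat.Prime q)) = [] from by decide]
      simp
    · apply List.map_congr_left
      intro j _
      rw [tbB_two]
  | succ t ih =>
    intro ht
    have hsplit : (List.range (t+1)).map (fun k => ((2+k:ℕ):Int))
        = (List.range t).map (fun k => ((2+k:ℕ):Int)) ++ [((2+t:ℕ):Int)] := by
      rw [List.range_succ]; simp
    rw [hsplit, List.foldl_append, ih (by omega), List.foldl_cons, List.foldl_nil]
    set i := 2 + t with hi
    have htest : (PySem.List.pyGetD ((List.range (N+1)).map (fun j => ((tbB i j : ℕ):Int)))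
        ((i:ℕ):Int) (0:Int)) = ((tbB i i : ℕ):Int) := by
      rw [PySem.List.pyGetD_natCast, PySem.List.getD_map_range _ _ _ _ (by omega)]
    unfold bodyB
    rw [htest]
    have h21 : 2 + (t+1) = i + 1 := by omega
    rw [h21]
    by_cases hpr : Nat.Prime i
    · rw [if_pos (by exact_mod_cast congrArg (fun m => ((m:ℕ):Int)) (tbB_self_prime i hpr))]
      simp only [Prod.mk.injEq]
      constructor
      · rw [List.range_succ, List.filter_append, List.map_append]
        simp [hpr]
      · rw [subPass_char N i (by omega) (fun j => ((tbB i j : ℕ):Int))]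
        apply List.map_congr_left
        intro j _
        by_cases hd : i ∣ j ∧ j ≠ 0
        · rw [if_pos hd]
          exact tbB_step_int i j hpr hd.1 hd.2
        · rw [if_neg hd]
          rcases (not_and_or.mp hd) with h | h
          · rw [tbB_succ_notdvd i j h]
          · have hj0 : j = 0 := by omega
            rw [hj0, tbB_zero, tbB_zero]
    · rw [if_neg (by
        intro hc
        have heq : tbB i i = i := by exact_mod_cast hc
        have h2i : 2 ≤ i := by omega
        have := tbB_self_composite i h2i hpr
        omega)]
      simp only [Prod.mk.injEq]
      constructor
      · rw [List.range_succ, List.filter_append, List.map_append,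
            show (List.filter (fun q => decide (Nat.Prime q)) [i]) = [] from by
              simp [hpr]]
        simp
      · apply List.map_congr_left
        intro j _
        rw [tbB_succ_notprime i j hpr]

lemma A_final (N : ℕ) (hN : 1 ≤ N) : totsieve ((N:ℕ):Int) = (primesL N, totL N) := by
  rw [totsieve_eq]
  have hcast : ((N:Int)+1) = (((N+1:ℕ)):Int) := by push_cast; ring
  have hr : PySem.List.pyRange 0 ((N:Int)+1) 1 = (List.range (N+1)).map (fun k => ((k:ℕ):Int)) := by
    rw [hcast, PySem.List.pyRange_zero_nat]
  have hinit1 : PySem.List.pySetD (PySem.List.pySetD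
        (((PySem.List.pyRange 0 ((N:Int)+1) 1)).map some) 0 none) 1 none
      = (List.range (N+1)).map (sfA N 0) := by
    rw [hr, List.map_map, setD01_map _ N hN]
    apply List.map_congr_left
    intro j _
    match j with
    | 0 => simp [Function.update, sfA]
    | 1 => simp [Function.update, sfA]
    | (j+2) => simp [Function.update, sfA]
  have hinit2 : PySem.List.pySetD (PySem.List.pySetD
        (PySem.List.pyRepeat [some (1:Int)] ((N:Int)+1)) 0 none) 1 none
      = (List.range (N+1)).map (taA N 0) := by
    rw [PySem.List.pyRepeat_singleton, show ((N:Int)+1).toNat = N+1 from by omega,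
        show List.replicate (N+1) (some (1:Int)) = (List.range (N+1)).map (fun _ => some (1:Int))
          from by rw [List.map_const', List.length_range],
        setD01_map _ N hN]
    apply List.map_congr_left
    intro j _
    match j with
    | 0 => simp [Function.update, taA]
    | 1 => simp [Function.update, taA]
    | (j+2) => simp [Function.update, taA, FD]
  rw [hinit1, hinit2, hr, A_loop N hN (N+1) le_rfl]
  congr 1
  · rw [List.filterMap_map]
    rw [filterMap_ite _ _ (fun q => decide (Nat.Prime q)) (fun q => ((q:ℕ):Int))
        (by intro j hj
            have hjN : j ≤ N := by have := List.mem_range.mp hj; omega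
            simp only [Function.comp_apply, id]
            rw [sfA_final N j hjN]
            by_cases hp : Nat.Prime j
            · rw [if_pos hp, if_pos (by simp [hp])]
            · rw [if_neg hp, if_neg (by simp [hp])])]
    rfl
  · unfold totL
    apply List.map_congr_left
    intro j hj
    have hjN : j < N+1 := List.mem_range.mp hj
    unfold taA
    by_cases hj1 : j ≤ 1
    · rw [if_pos hj1, if_pos hj1]
    · rw [if_neg hj1, if_neg hj1, key_eq N j (by omega) (by omega)]

lemma B_final (N : ℕ) (hN : 1 ≤ N) : totsieve_alt ((N:ℕ):Int) = (primesL N, totL N) := by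
  rw [totsieve_alt_eq]
  have hr2 : PySem.List.pyRange 2 ((N:Int)+1) 1
      = (List.range (N-1)).map (fun k => ((2+k:ℕ):Int)) := by
    rw [PySem.List.pyRange_one]
    rw [show (((N:Int)+1) - 2).toNat = N-1 from by omega]
    apply List.map_congr_left
    intro k _
    push_cast
    ring
  have hr : PySem.List.pyRange 0 ((N:Int)+1) 1 = (List.range (N+1)).map (fun j => ((j:ℕ):Int)) := by
    rw [show ((N:Int)+1) = (((N+1:ℕ)):Int) from by push_cast; ring, PySem.List.pyRange_zero_nat]
  rw [hr2, hr, B_loop N hN (N-1) (by omega)]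
  have h2N : 2 + (N-1) = N+1 := by omega
  rw [h2N]
  congr 1
  rw [List.map_map, setD01_map _ N hN]
  unfold totL
  apply List.map_congr_left
  intro j _
  match j with
  | 0 => simp [Function.update]
  | 1 => simp [Function.update]
  | (j+2) => simp [Function.update]

-- ===== VERDICT (by name: the statement is the Claim_ definition above) =====
theorem totsieve_spec : Claim_equal_totsieve := by
  unfold Claim_equal_totsieve Spec_totsieve Pre_totsieve
  intro n _ hpre
  lift n to ℕ using (by omega : (0:Int) ≤ n) with N
  have hN : 1 ≤ N := by exact_mod_cast hpre
  rw [A_final N hN, B_final N hN]
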